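-- pv_equiv track=rewrite | github.com/YousefSalaman/pyrunner | utils/expr_optimizer/regex_generator.py | _find_max_nested_parenthesis_level
-- ===== SOURCE A (Python) =====
-- def _find_max_nested_parenthesis_level(calc_str):
--
--     max_lvl = 0  # Current maximum nested parenthesis level
--     lvl_cnt = 0  # Counter for current nested parenthesis level
--
--     # Verify expression string for its max nested parenthesis level
--     for char in calc_str:
--
--         if char == "(":  # Increase the current level count by 1 for each "(" found
--             lvl_cnt += 1
--         elif char == ")":  # Decrease the current level count by 1 for each ")" found
--             lvl_cnt -= 1
--
--         if max_lvl < lvl_cnt:  # Update max level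
--             max_lvl = lvl_cnt
--
--     return max_lvl
-- ===== SOURCE B (Python) =====
-- def _find_max_nested_parenthesis_level(calc_str):
--     # Divide and conquer: for a segment return (total depth change, max prefix level
--     # over all prefixes including the empty one). For s = s1 + s2:
--     # total = t1 + t2 and maxpref = max(m1, t1 + m2).
--     def seg(lo, hi):
--         n = hi - lo
--         if n == 0:
--             return (0, 0)
--         if n == 1:
--             c = calc_str[lo]
--             d = 1 if c == "(" else (-1 if c == ")" else 0)
--             return (d, max(0, d))
--         mid = lo + n // 2
--         t1, m1 = seg(lo, mid)
--         t2, m2 = seg(mid, hi)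
--         return (t1 + t2, max(m1, t1 + m2))
--
--     return seg(0, len(calc_str))[1]
-- ===== Notes on version B (the rewrite author's own statement) =====
-- stated objective: alternative
-- what changed: Replaces A's sequential running-counter scan with a divide-and-conquer recursion that splits the string in halves and combines each half's (total delta, max prefix level) pair.
import Mathlib
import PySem

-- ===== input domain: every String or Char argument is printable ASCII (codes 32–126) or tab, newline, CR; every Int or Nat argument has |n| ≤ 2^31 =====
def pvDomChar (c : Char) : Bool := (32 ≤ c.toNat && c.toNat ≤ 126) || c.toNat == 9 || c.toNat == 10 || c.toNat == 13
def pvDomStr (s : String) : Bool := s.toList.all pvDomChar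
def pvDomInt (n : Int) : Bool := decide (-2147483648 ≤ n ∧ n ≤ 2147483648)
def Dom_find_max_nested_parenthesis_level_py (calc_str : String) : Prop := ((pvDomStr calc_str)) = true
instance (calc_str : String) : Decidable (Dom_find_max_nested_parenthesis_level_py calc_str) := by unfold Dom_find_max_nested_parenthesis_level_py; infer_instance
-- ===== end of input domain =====

-- B replaces A's sequential running-counter scan by a divide-and-conquer recursion on
-- string halves combining (total delta, max prefix level) pairs — alternative, same O(n) work.


-- ===== PORT A =====
def find_max_nested_parenthesis_level_py (calc_str : String) : Int :=
  (calc_str.toList.foldl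
    (fun (s : Int × Int) char =>
      let lvl_cnt : Int :=
        if char = '(' then s.2 + 1
        else if char = ')' then s.2 - 1
        else s.2
      (if s.1 < lvl_cnt then lvl_cnt else s.1, lvl_cnt))
    (0, 0)).1

-- ===== PORT B =====
-- B's seg(lo, hi) works on the slice calc_str[lo:hi]; the port passes the segment's
-- character list itself and splits it at n // 2, the same subdivision step for step.
def pvSeg : List Char → Int × Int
  | [] => (0, 0)
  | [c] =>
      let d : Int := if c = '(' then 1 else if c = ')' then -1 else 0
      (d, max 0 d)
  | c1 :: c2 :: rest =>
      let cs := c1 :: c2 :: rest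
      let mid := cs.length / 2
      let p := pvSeg (cs.take mid)
      let q := pvSeg (cs.drop mid)
      (p.1 + q.1, max p.2 (p.1 + q.2))
termination_by cs => cs.length
decreasing_by
  · simp; omega
  · simp; omega

def find_max_nested_parenthesis_level_py_alt (calc_str : String) : Int :=
  (pvSeg calc_str.toList).2

-- ===== PRECONDITION & SPEC =====
def Spec_find_max_nested_parenthesis_level_py (calc_str : String) (out : Int) : Prop := out = find_max_nested_parenthesis_level_py_alt calc_str
instance (calc_str : String) (out : Int) : Decidable (Spec_find_max_nested_parenthesis_level_py calc_str out) := by unfold Spec_find_max_nested_parenthesis_level_py; infer_instance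

-- ===== CLAIM (what is proved, stated in full; the proofs are below) =====
def Claim_equal_find_max_nested_parenthesis_level_py : Prop := ∀ (calc_str : String), Dom_find_max_nested_parenthesis_level_py calc_str → Spec_find_max_nested_parenthesis_level_py calc_str (find_max_nested_parenthesis_level_py calc_str)

-- ===== LEMMAS AND PROOFS =====

def pvDelta (c : Char) : Int := if c = '(' then 1 else if c = ')' then -1 else 0

-- total delta of a segment
def pvT : List Char → Int
  | [] => 0
  | c :: cs => pvDelta c + pvT cs

-- max running level over all prefixes (including the empty prefix)
def pvP : List Char → Int
  | [] => 0
  | c :: cs => max 0 (pvDelta c + pvP cs)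

theorem pvP_nonneg (cs : List Char) : 0 ≤ pvP cs := by
  cases cs with
  | nil => simp [pvP]
  | cons c cs => simp [pvP]

theorem pvT_append (a b : List Char) : pvT (a ++ b) = pvT a + pvT b := by
  induction a with
  | nil => simp [pvT]
  | cons c a ih => simp [pvT, ih]; ring

theorem pvP_append (a b : List Char) : pvP (a ++ b) = max (pvP a) (pvT a + pvP b) := by
  induction a with
  | nil => simpa [pvP, pvT] using pvP_nonneg b
  | cons c a ih =>
    simp only [List.cons_append, pvP, pvT, ih]
    omega

theorem pvSeg_eq (cs : List Char) : pvSeg cs = (pvT cs, pvP cs) := by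
  induction cs using pvSeg.induct with
  | case1 => simp [pvSeg, pvT, pvP]
  | case2 c => simp [pvSeg, pvT, pvP, pvDelta]
  | case3 c1 c2 rest cs mid ih1 ih2 =>
    rw [pvSeg, ih1, ih2, Prod.mk.injEq]
    constructor
    · rw [← pvT_append, List.take_append_drop]
    · rw [← pvP_append, List.take_append_drop]

-- A's loop from state (m, l) with l ≤ m computes max m (l + max prefix level)
theorem pvA_fold (cs : List Char) (m l : Int) (h : l ≤ m) :
    (cs.foldl
      (fun (s : Int × Int) char =>
        let lvl_cnt : Int :=
          if char = '(' then s.2 + 1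
          else if char = ')' then s.2 - 1
          else s.2
        (if s.1 < lvl_cnt then lvl_cnt else s.1, lvl_cnt))
      (m, l)).1 = max m (l + pvP cs) := by
  induction cs generalizing m l with
  | nil => simp [pvP]; omega
  | cons c cs ih =>
    have hd : (if c = '(' then l + 1 else if c = ')' then l - 1 else l) = l + pvDelta c := by
      unfold pvDelta; split_ifs <;> omega
    simp only [List.foldl, hd]
    rw [ih _ _ (by split_ifs <;> omega)]
    have := pvP_nonneg cs
    simp only [pvP]
    split_ifs <;> omega

theorem pv_main (calc_str : String) :
    find_max_nested_parenthesis_level_py calc_str = find_max_nested_parenthesis_level_py_alt calc_str := by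
  unfold find_max_nested_parenthesis_level_py find_max_nested_parenthesis_level_py_alt
  rw [pvA_fold _ 0 0 le_rfl, pvSeg_eq]
  have := pvP_nonneg calc_str.toList
  simp; omega

-- ===== VERDICT (by name: the statement is the Claim_ definition above) =====
theorem find_max_nested_parenthesis_level_py_spec : Claim_equal_find_max_nested_parenthesis_level_py := by
  intro calc_str _
  exact pv_main calc_str
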